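-- pv_equiv track=rewrite | github.com/l1n4n/Data-Struc-Algo-Specialization | 04_algo_on_str/W2/bwmatching.py | fill_counts_matrix
-- ===== SOURCE A (Python) =====
-- def fill_counts_matrix(bwt):
--     N = len(bwt)
--     Matrix = [[None] * (N + 1) for i in range(5)] # except for the one $ symbol, BWT(Text) contains symbols A, C, G, T only
--     symbols = ['$', 'A', 'C', 'G', 'T']
--     for i in range(5):
--         Matrix[i][0] = 0
--
--     for i in range(1, N + 1):
--         symbol = bwt[i - 1]
--         for j in range(5):
--             Matrix[j][i] = Matrix[j][i - 1] if symbol != symbols[j] else Matrix[j][i - 1] + 1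
--
--     return Matrix
-- ===== SOURCE B (Python) =====
-- def fill_counts_matrix(bwt):
--     # Count each symbol's total occurrences first, then build each row
--     # back-to-front by walking bwt right-to-left and subtracting.
--     matrix = []
--     for s in ['$', 'A', 'C', 'G', 'T']:
--         total = bwt.count(s)
--         row = [total]
--         for ch in reversed(bwt):
--             total -= (ch == s)
--             row.append(total)
--         row.reverse()
--         matrix.append(row)
--     return matrix
-- ===== Notes on version B (the rewrite author's own statement) =====
-- stated objective: alternative
-- what changed: Instead of A's forward column-by-column sweep incrementing a coupled 5x(N+1) matrix, B counts each symbol's total occurrences with str.count and then builds each of the five rows back-to-front by a right-to-left pass that subtracts from the total, reversing at the end.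
import Mathlib
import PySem

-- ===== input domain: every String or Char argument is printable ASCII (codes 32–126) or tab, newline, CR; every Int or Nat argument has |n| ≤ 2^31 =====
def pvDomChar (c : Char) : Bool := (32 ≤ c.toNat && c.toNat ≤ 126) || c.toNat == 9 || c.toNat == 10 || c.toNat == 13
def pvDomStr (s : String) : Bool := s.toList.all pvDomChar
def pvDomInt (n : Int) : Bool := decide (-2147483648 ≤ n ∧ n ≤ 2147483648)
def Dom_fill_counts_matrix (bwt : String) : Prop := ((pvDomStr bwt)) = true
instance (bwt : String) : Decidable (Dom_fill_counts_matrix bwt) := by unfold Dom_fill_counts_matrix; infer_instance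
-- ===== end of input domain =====

-- B replaces A's forward coupled column sweep by: count each symbol's total once, then build each row back-to-front right-to-left by subtraction; objective: alternative.


-- ===== PORT A =====
-- A preallocates a 5×(N+1) matrix and fills it column by column; ported as the same
-- left-to-right column sweep, each of the 5 rows growing by one entry per column.
def fill_counts_matrix (bwt : String) : List (List Int) :=
  let symbols : List Char := ['$', 'A', 'C', 'G', 'T']
  let init : List (List Int) := symbols.map (fun _ => [(0 : Int)])
  bwt.toList.foldl
    (fun M symbol =>
      (M.zip symbols).map (fun p =>
        p.1 ++ [if symbol ≠ p.2 then p.1.getLast?.getD 0 else p.1.getLast?.getD 0 + 1]))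
    init

-- ===== PORT B =====
-- B: per symbol, start from bwt.count(s) and walk bwt right-to-left, appending the
-- running difference, then reverse the row. descRow is the right-to-left append loop
-- (exact: one entry before the loop, one per character). bwt.count(s) for a single
-- character equals the character count, ported as List.count.
def descRow (s : Char) (a : Int) : List Char → List Int
  | [] => [a]
  | ch :: t => a :: descRow s (a - (if ch = s then 1 else 0)) t

def fill_counts_matrix_alt (bwt : String) : List (List Int) :=
  ['$', 'A', 'C', 'G', 'T'].map (fun s =>
    (descRow s ((bwt.toList.count s : Nat) : Int) bwt.toList.reverse).reverse)

-- ===== PRECONDITION & SPEC =====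
def Spec_fill_counts_matrix (bwt : String) (out : List (List Int)) : Prop := out = fill_counts_matrix_alt bwt
instance (bwt : String) (out : List (List Int)) : Decidable (Spec_fill_counts_matrix bwt out) := by unfold Spec_fill_counts_matrix; infer_instance

-- ===== CLAIM (what is proved, stated in full; the proofs are below) =====
def Claim_equal_fill_counts_matrix : Prop := ∀ (bwt : String), Dom_fill_counts_matrix bwt → Spec_fill_counts_matrix bwt (fill_counts_matrix bwt)

-- ===== LEMMAS AND PROOFS =====

-- forward prefix-count row (proof device characterising A's rows)
def accRow (s : Char) (a : Int) : List Char → List Int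
  | [] => [a]
  | ch :: t => a :: accRow s (a + (if ch = s then 1 else 0)) t

theorem accRow_last? (s : Char) (a : Int) (l : List Char) :
    (accRow s a l).getLast? = some (l.foldl (fun acc ch => acc + (if ch = s then 1 else 0)) a) := by
  induction l generalizing a with
  | nil => simp [accRow]
  | cons ch t ih => simp [accRow, List.getLast?_cons, ih]

theorem foldl_count (s : Char) (a : Int) (l : List Char) :
    l.foldl (fun acc ch => acc + (if ch = s then 1 else 0)) a = a + ((l.count s : Nat) : Int) := by
  induction l generalizing a with
  | nil => simp
  | cons ch t ih =>
    rw [List.foldl_cons, ih, List.count_cons]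
    by_cases h : ch = s <;> (simp [h]; try omega)

theorem accRow_append_singleton (s : Char) (a : Int) (l : List Char) (x : Char) :
    accRow s a (l ++ [x]) =
      accRow s a l ++ [l.foldl (fun acc ch => acc + (if ch = s then 1 else 0)) a +
        (if x = s then 1 else 0)] := by
  induction l generalizing a with
  | nil => simp [accRow]
  | cons ch t ih => simp [accRow, ih]

-- one row of A's column sweep, extended by column x, equals the prefix-count row of l ++ [x]
theorem row_step (s : Char) (l : List Char) (x : Char) :
    accRow s 0 l ++
      [if x ≠ s then (accRow s 0 l).getLast?.getD 0
       else (accRow s 0 l).getLast?.getD 0 + 1]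
    = accRow s 0 (l ++ [x]) := by
  rw [accRow_append_singleton, accRow_last?]
  by_cases h : x = s <;> simp [h]

-- A's whole column sweep equals the five forward prefix-count rows
theorem matrix_invariant (l : List Char) :
    l.foldl
      (fun M symbol =>
        (M.zip ['$', 'A', 'C', 'G', 'T']).map (fun p =>
          p.1 ++ [if symbol ≠ p.2 then p.1.getLast?.getD 0 else p.1.getLast?.getD 0 + 1]))
      ((['$', 'A', 'C', 'G', 'T'] : List Char).map (fun _ => [(0 : Int)]))
    = ['$', 'A', 'C', 'G', 'T'].map (fun s => accRow s 0 l) := by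
  induction l using List.reverseRecOn with
  | nil => simp [accRow]
  | append_singleton t x ih =>
    rw [List.foldl_append, ih]
    simp only [List.foldl_cons, List.foldl_nil, List.map_cons, List.map_nil,
      List.zip_cons_cons, List.zip_nil_right]
    rw [row_step, row_step, row_step, row_step, row_step]

-- B's backward subtraction row, reversed, is a forward prefix-count row
theorem descRow_reverse (s : Char) (l : List Char) (a : Int) :
    (descRow s a l).reverse = accRow s (a - ((l.count s : Nat) : Int)) l.reverse := by
  induction l generalizing a with
  | nil => simp [descRow, accRow]
  | cons ch t ih =>
    rw [descRow, List.reverse_cons, List.reverse_cons, ih, accRow_append_singleton,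
      foldl_count, List.count_cons, List.count_reverse]
    by_cases h : ch = s
    · simp [h]
      refine ⟨?_, by ring⟩
      congr 1
      ring
    · simp [h]

theorem rows_eq (s : Char) (l : List Char) :
    accRow s 0 l = (descRow s ((l.count s : Nat) : Int) l.reverse).reverse := by
  rw [descRow_reverse, List.count_reverse, List.reverse_reverse, sub_self]

-- ===== VERDICT (by name: the statement is the Claim_ definition above) =====
theorem fill_counts_matrix_spec : Claim_equal_fill_counts_matrix := by
  intro bwt _
  show fill_counts_matrix bwt = fill_counts_matrix_alt bwt
  unfold fill_counts_matrix fill_counts_matrix_alt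
  rw [matrix_invariant]
  simp only [List.map_cons, List.map_nil, rows_eq]
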